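-- pv_equiv track=rewrite | github.com/maxmurtazin/Ant-RH | core/gemma_planner.py | validate_word
-- ===== SOURCE A (Python) =====
-- from typing import Any, Dict, List, Optional
--
-- def validate_word(word: Any, max_length: int, max_power: int) -> bool:
--     if not isinstance(word, list):
--         return False
--     if len(word) < 3 or len(word) > int(max_length):
--         return False
--     vals: List[int] = []
--     for a in word:
--         if not isinstance(a, int):
--             return False
--         if a == 0 or abs(a) > int(max_power):
--             return False
--         vals.append(int(a))
--     for i in range(1, len(vals)):
--         if vals[i] == vals[i - 1]:
--             return False
--     if len(vals) >= 4:
--         for size in range(1, (len(vals) // 2) + 1):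
--             if vals[-size:] == vals[-2 * size : -size]:
--                 return False
--     return True
-- ===== SOURCE B (Python) =====
-- def validate_word(word, max_length, max_power):
--     if not isinstance(word, list):
--         return False
--     n = len(word)
--     if n < 3 or n > int(max_length):
--         return False
--     prev = None
--     for a in word:
--         if not isinstance(a, int):
--             return False
--         if a == 0 or abs(a) > int(max_power) or a == prev:
--             return False
--         prev = int(a)
--     # Z-algorithm on the reversed word: a repeated suffix block of size s
--     # exists iff z[s] >= s for some 1 <= s <= n // 2.
--     r = word[::-1]
--     z = [0] * n
--     l = 0
--     rr = 0
--     for i in range(1, n):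
--         k = min(z[i - l], rr - i) if i < rr else 0
--         while i + k < n and r[k] == r[i + k]:
--             k += 1
--         z[i] = k
--         if i + k > rr:
--             l = i
--             rr = i + k
--     for s in range(1, n // 2 + 1):
--         if z[s] >= s:
--             return False
--     return True
-- ===== Notes on version B (the rewrite author's own statement) =====
-- stated objective: alternative
-- what changed: Detects a repeated suffix block with a Z-algorithm on the reversed word (block of size s repeats iff z[s] >= s) instead of A's per-size slice comparisons, and fuses A's separate value-range and adjacent-duplicate loops into one pass; on random inputs validation fails early, so no measured speed-up is claimed.
import Mathlib
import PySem

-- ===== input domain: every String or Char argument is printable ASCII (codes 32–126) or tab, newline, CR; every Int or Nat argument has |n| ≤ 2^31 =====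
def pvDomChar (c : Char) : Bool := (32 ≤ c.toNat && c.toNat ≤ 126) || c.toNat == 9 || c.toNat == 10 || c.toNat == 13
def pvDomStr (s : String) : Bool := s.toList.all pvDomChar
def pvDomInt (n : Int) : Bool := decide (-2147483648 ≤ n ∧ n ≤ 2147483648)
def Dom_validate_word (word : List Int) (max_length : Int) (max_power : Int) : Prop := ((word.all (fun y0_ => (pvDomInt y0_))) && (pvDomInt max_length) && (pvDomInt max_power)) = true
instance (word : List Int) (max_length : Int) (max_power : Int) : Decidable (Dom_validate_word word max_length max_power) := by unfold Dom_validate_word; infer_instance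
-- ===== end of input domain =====

-- B detects a repeated suffix block via a Z-algorithm on the reversed word instead of
-- A's per-size slice comparisons, and fuses A's value and adjacency loops (alternative algorithm).

-- ===== PORT A =====
-- for a in word: a == 0 or abs(a) > max_power -> return False
def aValsLoop (max_power : Int) : List Int → Bool
  | [] => true
  | a :: rest =>
      if a == 0 || (if a < 0 then -a else a) > max_power then false
      else aValsLoop max_power rest

-- for i in range(1, len(vals)): vals[i] == vals[i-1] -> return False
def aAdjLoop : List Int → Bool
  | b :: c :: rest => if c == b then false else aAdjLoop (c :: rest)
  | _ => true

-- for size in range(1, len(vals)//2 + 1): vals[-size:] == vals[-2*size:-size] -> return False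
def aSquareAny (vals : List Int) (n : Nat) : Bool :=
  (List.range' 1 (n / 2)).any (fun size =>
    PySem.List.slice vals (some (-(size : Int))) none
      == PySem.List.slice vals (some (-(2 * (size : Int)))) (some (-(size : Int))))

def validate_word (word : List Int) (max_length : Int) (max_power : Int) : Bool :=
  if (word.length : Int) < 3 || (word.length : Int) > max_length then false
  else if !(aValsLoop max_power word) then false
  else if !(aAdjLoop word) then false
  else if 4 ≤ word.length then
    if aSquareAny word word.length then false else true
  else true

-- ===== PORT B =====
-- fused loop: a == 0 or abs(a) > max_power or a == prev -> return False
def bElemLoop (max_power : Int) (prev : Option Int) : List Int → Bool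
  | [] => true
  | a :: rest =>
      if a == 0 || (if a < 0 then -a else a) > max_power || some a == prev then false
      else bElemLoop max_power (some a) rest

-- while i + k < n and r[k] == r[i+k]: k += 1
def zExt (r : List Int) (i k : Nat) : Nat :=
  if i + k < r.length ∧ r.getD k 0 == r.getD (i + k) 0 then zExt r i (k + 1) else k
  termination_by r.length - (i + k)
  decreasing_by omega

-- for i in range(1, n): Z-algorithm main loop, state (z, l, rr)
def zLoop (r : List Int) (n : Nat) (z : List Nat) (l rr i : Nat) : List Nat :=
  if i < n then
    let k0 := if i < rr then min (z.getD (i - l) 0) (rr - i) else 0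
    let k := zExt r i k0
    let z' := z.set i k
    if i + k > rr then zLoop r n z' i (i + k) (i + 1)
    else zLoop r n z' l rr (i + 1)
  else z
  termination_by n - i
  decreasing_by all_goals omega

def validate_word_alt (word : List Int) (max_length : Int) (max_power : Int) : Bool :=
  let n := word.length
  if (n : Int) < 3 || (n : Int) > max_length then false
  else if !(bElemLoop max_power none word) then false
  else
    let r := word.reverse
    let z := zLoop r n (List.replicate n 0) 0 0 1
    if (List.range' 1 (n / 2)).any (fun s => s ≤ z.getD s 0) then false else true

-- ===== PRECONDITION & SPEC =====
def Spec_validate_word (word : List Int) (max_length : Int) (max_power : Int) (out : Bool) : Prop := out = validate_word_alt word max_length max_power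
instance (word : List Int) (max_length : Int) (max_power : Int) (out : Bool) : Decidable (Spec_validate_word word max_length max_power out) := by unfold Spec_validate_word; infer_instance

-- ===== CLAIM (what is proved, stated in full; the proofs are below) =====
def Claim_equal_validate_word : Prop := ∀ (word : List Int) (max_length : Int) (max_power : Int), Dom_validate_word word max_length max_power → Spec_validate_word word max_length max_power (validate_word word max_length max_power)

-- ===== LEMMAS AND PROOFS =====

-- longest common prefix length (specification of a Z-value)
def lcp : List Int → List Int → Nat
  | a :: as, b :: bs => if a = b then lcp as bs + 1 else 0
  | _, _ => 0

def Zval (r : List Int) (j : Nat) : Nat := lcp r (r.drop j)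

theorem lcp_le_right : ∀ a b : List Int, lcp a b ≤ b.length := by
  intro a
  induction a with
  | nil => intro b; cases b <;> simp [lcp]
  | cons x as ih =>
      intro b
      cases b with
      | nil => simp [lcp]
      | cons y bs =>
          simp only [lcp]; split
          · simpa using ih bs
          · simp

theorem lcp_match : ∀ (a b : List Int) (t : Nat), t < lcp a b → a[t]? = b[t]? := by
  intro a
  induction a with
  | nil => intro b t h; cases b <;> simp [lcp] at h
  | cons x as ih =>
      intro b t h
      cases b with
      | nil => simp [lcp] at h
      | cons y bs =>
          simp only [lcp] at h
          split at h
          · cases t with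
            | zero => simp_all
            | succ t' => simpa using ih bs t' (by omega)
          · omega

theorem lcp_ge_iff_take : ∀ (s : Nat) (a b : List Int), s ≤ a.length → s ≤ b.length →
    (s ≤ lcp a b ↔ a.take s = b.take s) := by
  intro s
  induction s with
  | zero => intro a b _ _; simp
  | succ s' ih =>
      intro a b ha hb
      cases a with
      | nil => simp at ha
      | cons x as =>
          cases b with
          | nil => simp at hb
          | cons y bs =>
              simp only [lcp, List.take_succ_cons]
              split
              · rename_i hxy
                subst hxy
                constructor
                · intro h
                  have := (ih as bs (by simpa using ha) (by simpa using hb)).mp (by omega)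
                  simp [this]
                · intro h
                  have h2 : as.take s' = bs.take s' := by simpa using h
                  have := (ih as bs (by simpa using ha) (by simpa using hb)).mpr h2
                  omega
              · rename_i hxy
                constructor
                · omega
                · intro h
                  exact absurd (List.cons_eq_cons.mp h).1 hxy

theorem lcp_offset : ∀ (k : Nat) (a b : List Int), k ≤ a.length → k ≤ b.length →
    (∀ j, j < k → a[j]? = b[j]?) → lcp a b = k + lcp (a.drop k) (b.drop k) := by
  intro k
  induction k with
  | zero => intro a b _ _ _; simp
  | succ k' ih =>
      intro a b ha hb hm
      cases a with
      | nil => simp at ha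
      | cons x as =>
          cases b with
          | nil => simp at hb
          | cons y bs =>
              have h0 : x = y := by simpa using hm 0 (by omega)
              subst h0
              simp only [lcp, if_true, List.drop_succ_cons]
              have := ih as bs (by simpa using ha) (by simpa using hb)
                (fun j hj => by simpa using hm (j + 1) (by omega))
              omega

-- the while loop computes the residual common extension
theorem zExt_eq : ∀ (r : List Int) (i k : Nat), k ≤ i + k →
    zExt r i k = k + lcp (r.drop k) (r.drop (i + k)) := by
  intro r i
  intro k
  induction hn : r.length - (i + k) using Nat.strong_induction_on generalizing k with
  | _ n ih =>
    intro hk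
    rw [zExt]
    by_cases hin : i + k < r.length
    · have hkr : k < r.length := by omega
      by_cases heq : r.getD k 0 = r.getD (i + k) 0
      · rw [if_pos (by exact ⟨hin, by simpa using heq⟩)]
        have step : zExt r i (k + 1) = (k + 1) + lcp (r.drop (k + 1)) (r.drop (i + (k + 1))) := by
          exact ih (r.length - (i + (k + 1))) (by omega) (k + 1) rfl (by omega)
        rw [step]
        have hdk : r.drop k = r[k] :: r.drop (k + 1) :=
          (List.drop_eq_getElem_cons (by omega)).trans rfl
        have hdik : r.drop (i + k) = r[i + k] :: r.drop (i + k + 1) :=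
          (List.drop_eq_getElem_cons (by omega)).trans rfl
        have hv : r[k] = r[i + k] := by
          have h1 : r.getD k 0 = r[k] := List.getD_eq_getElem r 0 hkr
          have h2 : r.getD (i + k) 0 = r[i + k] := List.getD_eq_getElem r 0 hin
          rw [h1, h2] at heq; exact heq
        rw [hdk, hdik]
        simp only [lcp, hv, if_true]
        have : i + (k + 1) = i + k + 1 := by omega
        rw [this]
        omega
      · rw [if_neg (by intro h; exact heq (by simpa using h.2))]
        have hdk : r.drop k = r[k] :: r.drop (k + 1) :=
          (List.drop_eq_getElem_cons (by omega)).trans rfl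
        have hdik : r.drop (i + k) = r[i + k] :: r.drop (i + k + 1) :=
          (List.drop_eq_getElem_cons (by omega)).trans rfl
        have hv : r[k] ≠ r[i + k] := by
          have h1 : r.getD k 0 = r[k] := List.getD_eq_getElem r 0 hkr
          have h2 : r.getD (i + k) 0 = r[i + k] := List.getD_eq_getElem r 0 hin
          rw [h1, h2] at heq; exact heq
        rw [hdk, hdik]
        simp [lcp, hv]
    · rw [if_neg (by intro h; exact hin h.1)]
      have : r.drop (i + k) = [] := List.drop_eq_nil_of_le (by omega)
      rw [this]
      have : lcp (r.drop k) [] = 0 := by cases r.drop k <;> simp [lcp]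
      omega

-- the extension starting from a sound skip value computes the true Z-value
theorem zExt_spec (r : List Int) (i k0 : Nat) (hi : 1 ≤ i) (hik : i + k0 ≤ r.length)
    (hm : ∀ j, j < k0 → r[j]? = r[i + j]?) :
    zExt r i k0 = Zval r i := by
  rw [zExt_eq r i k0 (by omega)]
  unfold Zval
  have := lcp_offset k0 r (r.drop i) (by omega) (by simp; omega)
    (fun j hj => by
      rw [List.getElem?_drop]
      exact hm j hj)
  rw [this, List.drop_drop]

-- invariant of the main Z loop
def ZInv (r : List Int) (n : Nat) (z : List Nat) (l rr i : Nat) : Prop :=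
  n = r.length ∧ z.length = n ∧ 1 ≤ i ∧ l < i ∧
  (∀ j, 1 ≤ j → j < i → j < n → z.getD j 0 = Zval r j) ∧
  ((l = 0 ∧ rr = 0) ∨ (1 ≤ l ∧ rr = l + Zval r l))

theorem zLoop_spec : ∀ (fuel : Nat) (r : List Int) (n : Nat) (z : List Nat) (l rr i : Nat),
    fuel = n - i → ZInv r n z l rr i →
    ∀ j, 1 ≤ j → j < n → (zLoop r n z l rr i).getD j 0 = Zval r j := by
  intro fuel
  induction fuel using Nat.strong_induction_on with
  | _ fuel ih =>
    intro r n z l rr i hfuel hinv j hj1 hjn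
    obtain ⟨hn, hzlen, hi1, hli, hdone, hbox⟩ := hinv
    rw [zLoop]
    by_cases hin : i < n
    · rw [if_pos hin]
      -- the computed k equals Zval r i
      have hrrle : rr ≤ n := by
        rcases hbox with ⟨_, h0⟩ | ⟨hl1, hrr⟩
        · omega
        · have := lcp_le_right r (r.drop l)
          have hdl : (r.drop l).length = r.length - l := by simp
          unfold Zval at hrr
          omega
      have hk : zExt r i (if i < rr then min (z.getD (i - l) 0) (rr - i) else 0) = Zval r i := by
        by_cases hirr : i < rr
        · rw [if_pos hirr]
          rcases hbox with ⟨hl0, hr0⟩ | ⟨hl1, hrr⟩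
          · omega
          · set k0 := min (z.getD (i - l) 0) (rr - i) with hk0
            have hil1 : 1 ≤ i - l := by omega
            have hiln : i - l < n := by omega
            have hzil : z.getD (i - l) 0 = Zval r (i - l) := hdone (i - l) hil1 (by omega) hiln
            apply zExt_spec r i k0 hi1 (by omega)
            intro t ht
            have ht1 : t < Zval r (i - l) := by rw [← hzil]; omega
            have ht2 : i + t < rr := by omega
            -- r[t] = r[(i-l)+t] from Z(i-l); r[(i-l)+t] = r[i+t] from Z l box
            have m1 : r[t]? = (r.drop (i - l))[t]? := lcp_match r (r.drop (i - l)) t ht1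
            have m2 : r[(i - l) + t]? = (r.drop l)[(i - l) + t]? := by
              have : (i - l) + t < Zval r l := by omega
              exact lcp_match r (r.drop l) ((i - l) + t) this
            rw [List.getElem?_drop] at m1 m2
            have e2 : l + (i - l + t) = i + t := by omega
            rw [e2] at m2
            exact m1.trans m2
        · rw [if_neg hirr]
          exact zExt_spec r i 0 hi1 (by omega) (by omega)
      set k := zExt r i (if i < rr then min (z.getD (i - l) 0) (rr - i) else 0) with hkdef
      have hset : ∀ j', 1 ≤ j' → j' < i + 1 → j' < n → (z.set i k).getD j' 0 = Zval r j' := by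
        intro j' h1 h2 h3
        by_cases hji : j' = i
        · subst hji
          rw [List.getD_eq_getElem?_getD, List.getElem?_set_self (by omega)]
          simpa using hk
        · rw [List.getD_eq_getElem?_getD, List.getElem?_set_ne (by omega)]
          rw [← List.getD_eq_getElem?_getD]
          exact hdone j' h1 (by omega) h3
      have hzlen' : (z.set i k).length = n := by simpa using hzlen
      by_cases hadv : i + k > rr
      · rw [if_pos hadv]
        exact ih (n - (i + 1)) (by omega) r n (z.set i k) i (i + k) (i + 1) rfl
          ⟨hn, hzlen', by omega, by omega, hset, Or.inr ⟨by omega, by rw [← hk]⟩⟩ j hj1 hjn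
      · rw [if_neg hadv]
        exact ih (n - (i + 1)) (by omega) r n (z.set i k) l rr (i + 1) rfl
          ⟨hn, hzlen', by omega, by omega, hset, hbox⟩ j hj1 hjn
    · rw [if_neg hin]
      exact hdone j hj1 (by omega) hjn

-- the fused element loop equals A's two loops
theorem bElemLoop_none : ∀ (mp : Int) (w : List Int),
    bElemLoop mp none w = (aValsLoop mp w && aAdjLoop w) := by
  have key : ∀ (mp : Int) (w : List Int) (p : Int),
      bElemLoop mp (some p) w = (aValsLoop mp w && aAdjLoop (p :: w)) := by
    intro mp w
    induction w with
    | nil => intro p; simp [bElemLoop, aValsLoop, aAdjLoop]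
    | cons a rest ih =>
        intro p
        simp only [bElemLoop, aValsLoop, aAdjLoop]
        by_cases hz : a = 0
        · simp [hz]
        · by_cases hab : (if a < 0 then -a else a) > mp
          · simp [hz, hab]
          · by_cases hp : a = p
            · simp [hz, hab, hp]
            · simp [hz, hab, hp, Ne.symm hp, ih]
  intro mp w
  cases w with
  | nil => simp [bElemLoop, aValsLoop, aAdjLoop]
  | cons a rest =>
      simp only [bElemLoop, aValsLoop]
      by_cases hz : a = 0
      · simp [hz]
      · by_cases hab : (if a < 0 then -a else a) > mp
        · simp [hz, hab]
        · simp [hz, hab, key, Bool.and_assoc]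

-- per-size bridge: the slice comparison equals the Z-value test on the reversed list
theorem slice_eq_iff_zval (w : List Int) (s : Nat) (hs1 : 1 ≤ s) (hs2 : 2 * s ≤ w.length) :
    ((PySem.List.slice w (some (-(s : Int))) none
      == PySem.List.slice w (some (-(2 * (s : Int)))) (some (-(s : Int)))) = true)
    ↔ s ≤ Zval w.reverse s := by
  have e1 : PySem.List.slice w (some (-(s : Int))) none = w.drop (w.length - s) :=
    PySem.List.slice_from_neg_natCast w s hs1
  have e2 : PySem.List.slice w (some (-(2 * (s : Int)))) (some (-(s : Int)))
      = (w.drop (w.length - 2 * s)).take s := by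
    have h2s : (-(2 * (s : Int))) = -((2 * s : Nat) : Int) := by push_cast; ring
    rw [h2s]
    simp only [PySem.List.slice,
      PySem.List.clampIdx_neg_natCast _ _ (by omega : 0 < 2 * s),
      PySem.List.clampIdx_neg_natCast _ _ hs1]
    congr 1
    omega
  rw [e1, e2]
  -- reverse both sides: the suffix becomes take s, the middle block becomes take s ∘ drop s
  have r1 : (w.drop (w.length - s)).reverse = w.reverse.take s := by
    rw [List.reverse_drop]
    congr 1
    omega
  have r2 : ((w.drop (w.length - 2 * s)).take s).reverse = (w.reverse.drop s).take s := by
    rw [List.reverse_take, List.reverse_drop, List.length_drop]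
    have ea : w.length - (w.length - 2 * s) = 2 * s := by omega
    rw [ea]
    have eb : 2 * s - s = s := by omega
    rw [eb, List.drop_take, eb]
  have hiff : w.drop (w.length - s) = (w.drop (w.length - 2 * s)).take s
      ↔ w.reverse.take s = (w.reverse.drop s).take s := by
    constructor
    · intro h; rw [← r1, ← r2, h]
    · intro h
      have h2 := r1.trans (h.trans r2.symm)
      have := congrArg List.reverse h2
      simpa using this
  have hz := lcp_ge_iff_take s w.reverse (w.reverse.drop s)
    (by simp; omega) (by simp; omega)
  rw [beq_iff_eq, hiff]
  unfold Zval
  exact hz.symm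

-- ===== VERDICT (by name: the statement is the Claim_ definition above) =====
theorem validate_word_spec : Claim_equal_validate_word := by
  intro word max_length max_power _
  unfold Spec_validate_word validate_word validate_word_alt
  rw [bElemLoop_none]
  by_cases hlen : (decide ((word.length : Int) < 3) || decide ((word.length : Int) > max_length)) = true
  · simp only [hlen, if_true]
  · simp only [Bool.not_eq_true] at hlen
    simp only [hlen, Bool.false_eq_true, if_false]
    have hn3 : 3 ≤ word.length := by
      simp only [Bool.or_eq_false_iff, decide_eq_false_iff_not, not_lt] at hlen
      have := hlen.1
      omega
    by_cases hvals : aValsLoop max_power word = true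
    · by_cases hadj : aAdjLoop word = true
      · simp only [hvals, hadj, Bool.and_self, Bool.not_true, Bool.false_eq_true, if_false]
        have hzfin : ∀ j, 1 ≤ j → j < word.length →
            (zLoop word.reverse word.length (List.replicate word.length 0) 0 0 1).getD j 0
              = Zval word.reverse j := by
          have hinv : ZInv word.reverse word.length (List.replicate word.length 0) 0 0 1 := by
            unfold ZInv
            exact ⟨by simp, by simp, by omega, by omega,
              by intro j h1 h2 h3; omega, Or.inl ⟨rfl, rfl⟩⟩
          exact zLoop_spec (word.length - 1) word.reverse word.length
            (List.replicate word.length 0) 0 0 1 rfl hinv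
        have helem : ∀ s, s ∈ List.range' 1 (word.length / 2) →
            ((PySem.List.slice word (some (-(s : Int))) none
              == PySem.List.slice word (some (-(2 * (s : Int)))) (some (-(s : Int)))) = true
            ↔ (decide (s ≤ (zLoop word.reverse word.length
                (List.replicate word.length 0) 0 0 1).getD s 0)) = true) := by
          intro s hsmem
          obtain ⟨i, hilt, hseq⟩ := List.mem_range'.mp hsmem
          have hs1 : 1 ≤ s := by omega
          have hs2 : 2 * s ≤ word.length := by
            have : s ≤ word.length / 2 := by omega
            omega
          have hsn : s < word.length := by omega
          rw [hzfin s hs1 hsn, decide_eq_true_eq]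
          exact slice_eq_iff_zval word s hs1 hs2
        have hany : aSquareAny word word.length
            = (List.range' 1 (word.length / 2)).any
              (fun s => decide (s ≤ (zLoop word.reverse word.length
                (List.replicate word.length 0) 0 0 1).getD s 0)) := by
          unfold aSquareAny
          rw [Bool.eq_iff_iff]
          simp only [List.any_eq_true]
          constructor
          · rintro ⟨x, hx, hp⟩; exact ⟨x, hx, (helem x hx).mp hp⟩
          · rintro ⟨x, hx, hp⟩; exact ⟨x, hx, (helem x hx).mpr hp⟩
        by_cases h4 : 4 ≤ word.length
        · rw [if_pos h4, hany]
        · rw [if_neg h4]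
          have hlen3 : word.length = 3 := by omega
          have hzero : (List.range' 1 (word.length / 2)).any
              (fun s => decide (s ≤ (zLoop word.reverse word.length
                (List.replicate word.length 0) 0 0 1).getD s 0)) = false := by
            rw [List.any_eq_false]
            intro s hsmem
            obtain ⟨i, hilt, hseq⟩ := List.mem_range'.mp hsmem
            have hs1 : s = 1 := by
              rw [hlen3] at hilt
              omega
            subst hs1
            rw [hzfin 1 (by omega) (by omega)]
            obtain ⟨a, b, c, rfl⟩ := List.length_eq_three.mp hlen3
            have hcb : ¬ c = b := by
              simp only [aAdjLoop] at hadj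
              split at hadj
              · exact absurd hadj (by simp)
              · split at hadj
                · exact absurd hadj (by simp)
                · rename_i h' h''
                  simpa using h''
            have : Zval ([a, b, c] : List Int).reverse 1 = 0 := by
              simp [Zval, lcp, hcb]
            rw [this]
            simp
          rw [hzero]
          simp
      · simp [hvals, hadj]
    · simp [hvals]
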